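-- pv_equiv track=rewrite | github.com/Hackdotslash/T09-LeoCode | CO2_efficient_mailing_system/API/imap.py | __separate_mail_headers
-- ===== SOURCE A (Python) =====
-- def __separate_mail_headers(msg):
--     '''Get individual mails from received'''
--
--     lines_arr = msg.splitlines()
--     ans = []
--     email = ""
--     prev_start = 0
--     index = 0
--     while index < len(lines_arr):
--         # This indicates the end of particular mail
--         if lines_arr[index] == "":
--             email = ""
--             for item in lines_arr[prev_start + 1:index]:
--                 email += item + "\n"
--             prev_start = index + 2
--             ans.append(email)
--         index += 1
--     return ans
-- ===== SOURCE B (Python) =====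
-- def __separate_mail_headers(msg):
--     '''Get individual mails from received'''
--     ans = []
--     current = []
--     skip = 1
--     for line in msg.splitlines():
--         if line == "":
--             ans.append(''.join(l + '\n' for l in current))
--             current = []
--             skip = 2
--         elif skip > 0:
--             skip -= 1
--         else:
--             current.append(line)
--     return ans
-- ===== Notes on version B (the rewrite author's own statement) =====
-- stated objective: alternative
-- what changed: Replaces A's while-loop with an index and prev_start pointer that re-slices and re-joins lines[prev_start+1:index] at every blank line by a single incremental state machine over splitlines() that maintains a current-segment accumulator and a skip counter, flushing on blanks.
import Mathlib
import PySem

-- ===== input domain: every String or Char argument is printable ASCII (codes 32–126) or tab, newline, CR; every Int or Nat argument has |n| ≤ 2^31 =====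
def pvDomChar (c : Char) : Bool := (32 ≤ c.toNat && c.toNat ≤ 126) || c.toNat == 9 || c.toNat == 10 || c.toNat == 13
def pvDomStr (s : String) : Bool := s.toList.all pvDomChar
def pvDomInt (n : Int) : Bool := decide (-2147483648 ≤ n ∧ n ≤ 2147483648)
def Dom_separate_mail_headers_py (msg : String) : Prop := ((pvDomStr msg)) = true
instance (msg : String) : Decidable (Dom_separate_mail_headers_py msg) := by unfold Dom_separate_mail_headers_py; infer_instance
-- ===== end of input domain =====

-- B replaces A's index/prev_start pointer-and-re-slice loop by an incremental accumulator
-- state machine over the lines (objective: alternative; return values proved equal).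

-- ===== PORT A =====
-- the while loop of A: recursion on the remaining index range; state = (prev_start, ans);
-- 'email' is recomputed by the inner for-loop (ported as the same foldl) before every append
def sepA_loop (lines : List String) (index : Nat) (prev_start : Nat) (ans : List String) :
    List String :=
  if h : index < lines.length then
    if lines[index] == "" then
      let email := (PySem.List.slice lines (some ((prev_start : Int) + 1)) (some (index : Int))).foldl
        (fun e item => e ++ item ++ "\n") ""
      sepA_loop lines (index + 1) (index + 2) (ans ++ [email])
    else
      sepA_loop lines (index + 1) prev_start ans
  else ans
termination_by lines.length - index

def separate_mail_headers_py (msg : String) : List String :=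
  let lines_arr := PySem.Str.splitlines msg
  sepA_loop lines_arr 0 0 []

-- ===== PORT B =====
-- B's single for-loop over the lines: state = (skip, current, ans), flushing on a blank line
def sepB_loop (rest : List String) (skip : Int) (current : List String) (ans : List String) :
    List String :=
  match rest with
  | [] => ans
  | line :: rest' =>
    if line == "" then
      sepB_loop rest' 2 [] (ans ++ [PySem.Str.join "" (current.map (fun l => l ++ "\n"))])
    else if skip > 0 then
      sepB_loop rest' (skip - 1) current ans
    else
      sepB_loop rest' skip (current ++ [line]) ans

def separate_mail_headers_py_alt (msg : String) : List String :=
  sepB_loop (PySem.Str.splitlines msg) 1 [] []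

-- ===== PRECONDITION & SPEC =====
def Spec_separate_mail_headers_py (msg : String) (out : List String) : Prop := out = separate_mail_headers_py_alt msg
instance (msg : String) (out : List String) : Decidable (Spec_separate_mail_headers_py msg out) := by unfold Spec_separate_mail_headers_py; infer_instance

-- ===== CLAIM (what is proved, stated in full; the proofs are below) =====
def Claim_equal_separate_mail_headers_py : Prop := ∀ (msg : String), Dom_separate_mail_headers_py msg → Spec_separate_mail_headers_py msg (separate_mail_headers_py msg)

-- ===== LEMMAS AND PROOFS =====

-- ''.join(l + '\n' for l in current)  equals A's string-accumulating inner loop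
theorem join_empty_cons (x : String) (l : List String) :
    PySem.Str.join "" (x :: l) = x ++ PySem.Str.join "" l := by
  have h : (PySem.Str.join "" (x :: l)).toList = (x ++ PySem.Str.join "" l).toList := by
    cases l <;> simp [PySem.Str.toList_join, PySem.Chars.join, List.intercalate]
  exact String.toList_inj.mp h

theorem foldl_append_newline (l : List String) (acc : String) :
    l.foldl (fun e item => e ++ item ++ "\n") acc
      = acc ++ PySem.Str.join "" (l.map (fun x => x ++ "\n")) := by
  induction l generalizing acc with
  | nil => simp [PySem.Str.join, PySem.Chars.join, List.intercalate]
  | cons x t ih =>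
    simp only [List.foldl_cons, List.map_cons, join_empty_cons]
    rw [ih]
    simp [String.append_assoc]

-- the loop invariant: A's (prev_start) pointer state corresponds to B's (skip, current) state
theorem loop_eq (lines : List String) :
    ∀ (k index prev_start : Nat) (ans current : List String) (skip : Int),
      lines.length - index = k →
      ((skip = 0 ∧ prev_start + 1 ≤ index ∧
          current = (lines.drop (prev_start + 1)).take (index - (prev_start + 1))) ∨
        ((skip = 1 ∨ skip = 2) ∧ current = [] ∧ prev_start + 1 = index + skip.toNat)) →
      sepA_loop lines index prev_start ans = sepB_loop (lines.drop index) skip current ans := by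
  intro k
  induction k with
  | zero =>
    intro index prev_start ans current skip hk _
    have hle : lines.length ≤ index := by omega
    rw [sepA_loop, dif_neg (by omega), List.drop_eq_nil_of_le hle, sepB_loop]
  | succ n ih =>
    intro index prev_start ans current skip hk hinv
    have hlt : index < lines.length := by omega
    have hdrop : lines.drop index = lines[index] :: lines.drop (index + 1) :=
      List.drop_eq_getElem_cons hlt
    rw [sepA_loop, dif_pos hlt, hdrop, sepB_loop]
    by_cases hb : lines[index] == ""
    · rw [if_pos hb, if_pos hb]
      have hemail :
          (PySem.List.slice lines (some ((prev_start : Int) + 1)) (some (index : Int))).foldl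
              (fun e item => e ++ item ++ "\n") ""
            = PySem.Str.join "" (current.map (fun l => l ++ "\n")) := by
        have hslice : PySem.List.slice lines (some ((prev_start : Int) + 1)) (some (index : Int))
            = (lines.drop (prev_start + 1)).take (index - (prev_start + 1)) := by
          have := PySem.List.slice_natCast lines (prev_start + 1) index
          simpa using this
        rcases hinv with ⟨_, _, hcur⟩ | ⟨_, hcur, hps⟩
        · rw [hslice, ← hcur, foldl_append_newline]
          exact String.toList_inj.mp (by simp)
        · have : (index : Nat) - (prev_start + 1) = 0 := by omega
          rw [hslice, this, List.take_zero, hcur]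
          simp only [List.map_nil, List.foldl_nil]
          exact String.toList_inj.mp (by simp)
      rw [hemail]
      exact ih (index + 1) (index + 2) _ [] 2 (by omega) (Or.inr ⟨Or.inr rfl, rfl, by omega⟩)
    · rw [if_neg hb, if_neg hb]
      rcases hinv with ⟨hs0, hle, hcur⟩ | ⟨hs12, hcur, hps⟩
      · rw [if_neg (by simp [hs0])]
        refine ih (index + 1) prev_start ans (current ++ [lines[index]]) skip (by omega)
          (Or.inl ⟨hs0, by omega, ?_⟩)
        have h1 : index + 1 - (prev_start + 1) = (index - (prev_start + 1)) + 1 := by omega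
        have h2 : index - (prev_start + 1) < (lines.drop (prev_start + 1)).length := by
          rw [List.length_drop]; omega
        have h3 : lines[index] = (lines.drop (prev_start + 1))[index - (prev_start + 1)]'h2 := by
          rw [List.getElem_drop]
          congr 1
          omega
        rw [hcur, h1, h3, ← List.take_concat_get' _ _ h2]
      · rcases hs12 with hs | hs
        · rw [if_pos (by simp [hs])]
          refine ih (index + 1) prev_start ans current (skip - 1) (by omega)
            (Or.inl ⟨by omega, by omega, ?_⟩)
          have : index + 1 - (prev_start + 1) = 0 := by omega
          rw [this, List.take_zero, hcur]
        · rw [if_pos (by simp [hs])]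
          exact ih (index + 1) prev_start ans current (skip - 1) (by omega)
            (Or.inr ⟨Or.inl (by omega), hcur, by omega⟩)

-- ===== VERDICT (by name: the statement is the Claim_ definition above) =====
theorem separate_mail_headers_py_spec : Claim_equal_separate_mail_headers_py := by
  intro msg _
  show separate_mail_headers_py msg = separate_mail_headers_py_alt msg
  unfold separate_mail_headers_py separate_mail_headers_py_alt
  exact loop_eq _ _ 0 0 [] [] 1 rfl (Or.inr ⟨Or.inl rfl, rfl, rfl⟩)
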